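-- pv_equiv track=rewrite | github.com/hanna56/Programmers_Level1 | 비밀지도.py | solution
-- ===== SOURCE A (Python) =====
-- def solution(n, arr1, arr2):
--     answer = []
--     arr = []
--     for num in arr1+arr2:
--         num_to_two = []
--         for i in range(n):
--             if num!=0:
--                 num_to_two.append(num%2)
--                 num=num//2
--             else:
--                 num_to_two.append(0)
--         num_to_two.reverse()
--         arr.append(num_to_two)
--
--     for i in range(n):
--         ans = ""
--         for j in range(n):
--             if arr[i][j] == 1 or arr[i+n][j] == 1:
--                 ans += "#"
--             else:
--                 ans += " "
--         answer.append(ans)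
--
--     return answer
-- ===== SOURCE B (Python) =====
-- def solution(n, arr1, arr2):
--     combined = arr1 + arr2
--     table = str.maketrans('01', ' #')
--     return ['{:0{}b}'.format((combined[i] % (1 << n)) | (combined[i + n] % (1 << n)), n).translate(table)
--             for i in range(n)]
-- ===== Notes on version B (the rewrite author's own statement) =====
-- stated objective: faster
-- what changed: Replaces A's explicit per-number bit-list grid and per-cell comparison loops by integer arithmetic: OR the two masked row values and format the result as an n-wide binary string translated to '#'/' '.
-- outside the precondition, e.g. on solution(2, [-1, -1, -1], []): A returns ['##', '##'], B raises IndexError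
import Mathlib
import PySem

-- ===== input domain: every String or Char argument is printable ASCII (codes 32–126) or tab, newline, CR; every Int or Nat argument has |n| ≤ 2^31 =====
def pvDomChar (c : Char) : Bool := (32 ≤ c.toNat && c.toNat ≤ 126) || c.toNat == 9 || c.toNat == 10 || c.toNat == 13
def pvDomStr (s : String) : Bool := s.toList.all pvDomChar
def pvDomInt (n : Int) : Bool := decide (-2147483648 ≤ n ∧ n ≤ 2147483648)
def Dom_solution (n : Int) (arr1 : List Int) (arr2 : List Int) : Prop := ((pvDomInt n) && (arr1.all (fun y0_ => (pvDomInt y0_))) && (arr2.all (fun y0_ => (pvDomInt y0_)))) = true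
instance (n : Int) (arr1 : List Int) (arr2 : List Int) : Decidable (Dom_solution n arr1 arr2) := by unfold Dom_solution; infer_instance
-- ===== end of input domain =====

-- B replaces A's per-number bit-list grid and per-cell comparison by integer arithmetic:
-- OR the two masked row values and format them as an n-bit binary string translated to '#'/' ' (objective: faster; a timing run measured B well over 1.5× faster).

-- ===== PORT A =====
-- inner bit-extraction loop: 'for i in range(n): if num!=0: append(num%2); num//=2 else: append(0)'
def solBits : Nat → Int → List Int → Int × List Int
  | 0, num, acc => (num, acc)
  | k+1, num, acc =>
    if num ≠ 0 then solBits k (PySem.Int.floordiv num 2) (acc ++ [PySem.Int.mod num 2])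
    else solBits k num (acc ++ [0])

def solRow (n : Nat) (num : Int) : List Int := (solBits n num []).2.reverse

-- inner string loop: 'for j in range(n): ans += "#" if arr[i][j]==1 or arr[i+n][j]==1 else " "'
-- (list indexing is total here via getD; Pre_solution keeps every index A evaluates in range)
def solInner (arr : List (List Int)) (n : Nat) (i : Nat) : String :=
  (List.range n).foldl
    (fun ans j =>
      if (arr.getD i []).getD j 0 = 1 ∨ (arr.getD (i + n) []).getD j 0 = 1
      then ans ++ "#" else ans ++ " ") ""

def solution (n : Int) (arr1 : List Int) (arr2 : List Int) : List String :=
  let arr := (arr1 ++ arr2).foldl (fun acc num => acc ++ [solRow n.toNat num]) []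
  (List.range n.toNat).foldl (fun answer i => answer ++ [solInner arr n.toNat i]) []

-- ===== PORT B =====
def trChar (c : Char) : Char := if c = '1' then '#' else ' '

-- '{:0{w}b}'.format(v): zero-padded width-w binary rendering of v < 2^w
def natBits : Nat → Nat → List Char
  | 0, _ => []
  | w+1, v => natBits w (v / 2) ++ [if v % 2 = 1 then '1' else '0']

def solution_alt (n : Int) (arr1 : List Int) (arr2 : List Int) : List String :=
  let combined := arr1 ++ arr2
  (List.range n.toNat).map (fun i =>
    let v : Nat := (PySem.Int.mod (combined.getD i 0) (2 ^ n.toNat)).toNat |||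
                   (PySem.Int.mod (combined.getD (i + n.toNat) 0) (2 ^ n.toNat)).toNat
    String.ofList ((natBits n.toNat v).map trChar))

-- ===== PRECONDITION & SPEC =====
-- Pre_ excludes inputs with fewer than 2n rows: there A usually raises IndexError on arr[i+n],
-- but when every bit it tests first happens to be 1 the short-circuit 'or' lets A return anyway —
-- an accident of evaluation order that B (which always reads both rows) does not reproduce.
def Pre_solution (n : Int) (arr1 : List Int) (arr2 : List Int) : Prop :=
  0 < n → 2 * n ≤ (arr1.length : Int) + (arr2.length : Int)
instance (n : Int) (arr1 : List Int) (arr2 : List Int) : Decidable (Pre_solution n arr1 arr2) := by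
  unfold Pre_solution; infer_instance

def pvWitness_solution : Int × List Int × List Int := (2, [9, 20], [30, 1])

def Spec_solution (n : Int) (arr1 : List Int) (arr2 : List Int) (out : List String) : Prop := out = solution_alt n arr1 arr2
instance (n : Int) (arr1 : List Int) (arr2 : List Int) (out : List String) : Decidable (Spec_solution n arr1 arr2 out) := by unfold Spec_solution; infer_instance

-- ===== CLAIM (what is proved, stated in full; the proofs are below) =====
def Claim_equal_solution : Prop := ∀ (n : Int) (arr1 : List Int) (arr2 : List Int), Dom_solution n arr1 arr2 → Pre_solution n arr1 arr2 → Spec_solution n arr1 arr2 (solution n arr1 arr2)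

-- ===== LEMMAS AND PROOFS =====

-- repeated floor-halving, used only to characterise A's bit loop
def fdivPow (a : Int) : Nat → Int
  | 0 => a
  | m+1 => fdivPow (PySem.Int.floordiv a 2) m

theorem solBits_eq (k : Nat) : ∀ (num : Int) (acc : List Int),
    (solBits k num acc).2 = acc ++ (List.range k).map (fun m => PySem.Int.mod (fdivPow num m) 2) := by
  induction k with
  | zero => intro num acc; simp [solBits]
  | succ k ih =>
    intro num acc
    have key : solBits (k+1) num acc
        = solBits k (PySem.Int.floordiv num 2) (acc ++ [PySem.Int.mod num 2]) := by
      by_cases h : num = 0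
      · subst h; simp [solBits, PySem.Int.floordiv, PySem.Int.mod]
      · simp [solBits, h]
    rw [key, ih, List.range_succ_eq_map]
    simp [fdivPow, List.map_map, Function.comp]

theorem solRow_eq (n : Nat) (num : Int) :
    solRow n num = ((List.range n).map (fun m => PySem.Int.mod (fdivPow num m) 2)).reverse := by
  unfold solRow; rw [solBits_eq]; simp

theorem foldl_str (g : Nat → Char) : ∀ (l : List Nat) (s : String),
    l.foldl (fun s j => s ++ String.ofList [g j]) s = s ++ String.ofList (l.map g) := by
  intro l
  induction l with
  | nil => intro s; simp
  | cons a l ih =>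
    intro s
    simp only [List.foldl_cons, List.map_cons, ih]
    have : String.ofList (g a :: l.map g) = String.ofList [g a] ++ String.ofList (l.map g) := by
      rw [← String.ofList_append]; rfl
    rw [this, String.append_assoc]

theorem map_range_rev {α : Type} (G : Nat → α) (N : Nat) :
    (List.range N).map (fun j => G (N - 1 - j)) = ((List.range N).map G).reverse := by
  apply List.ext_getElem
  · simp
  · intro j h1 h2
    simp only [List.getElem_map, List.getElem_range, List.getElem_reverse, List.length_map,
      List.length_range]

theorem lor_div_two (x y : Nat) : (x ||| y)/2 = x/2 ||| y/2 := by
  apply Nat.eq_of_testBit_eq; intro i; simp [Nat.testBit_div_two]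

theorem half_mod (a : Int) (k : Nat) :
    (PySem.Int.mod a (2^(k+1))).toNat / 2 = (PySem.Int.mod (PySem.Int.floordiv a 2) (2^k)).toNat := by
  rw [PySem.Int.mod_eq_emod_of_pos (by positivity), PySem.Int.mod_eq_emod_of_pos (by positivity),
    PySem.Int.floordiv_eq_ediv_of_pos (by norm_num)]
  have hmain : (a % 2^(k+1)) / 2 = (a / 2) % 2^k := by
    have hq : a = a % 2^(k+1) + (2^k * (a / 2^(k+1))) * 2 := by
      have := Int.mul_ediv_add_emod a (2^(k+1)); ring_nf; ring_nf at this; omega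
    have h2 : a / 2 = (a % 2^(k+1)) / 2 + 2^k * (a / 2^(k+1)) := by
      conv_lhs => rw [hq]
      rw [Int.add_mul_ediv_right _ _ (by norm_num : (2:Int) ≠ 0)]
    rw [h2, Int.add_mul_emod_self_left]
    have hr0 : 0 ≤ a % 2^(k+1) := Int.emod_nonneg a (by positivity)
    have hrlt : a % 2^(k+1) < 2^(k+1) := Int.emod_lt_of_pos a (by positivity)
    have hlt : (a % 2^(k+1)) / 2 < 2^k := by
      rw [Int.ediv_lt_iff_lt_mul (by norm_num)]
      calc a % 2^(k+1) < 2^(k+1) := hrlt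
        _ = 2^k * 2 := by ring
    exact (Int.emod_eq_of_lt (by positivity) hlt).symm
  have h0 : 0 ≤ a % 2^(k+1) := Int.emod_nonneg a (by positivity)
  have h1 : 0 ≤ (a / 2) % 2^k := Int.emod_nonneg _ (by positivity)
  omega

theorem low_bit (a : Int) (k : Nat) :
    ((PySem.Int.mod a (2^(k+1))).toNat % 2 = 1) ↔ PySem.Int.mod a 2 = 1 := by
  rw [PySem.Int.mod_eq_emod_of_pos (by positivity), PySem.Int.mod_eq_emod_of_pos (by norm_num)]
  have h1 : (a % 2^(k+1)) % 2 = a % 2 := Int.emod_emod_of_dvd a ⟨2^k, by ring⟩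
  have h0 : 0 ≤ a % 2^(k+1) := Int.emod_nonneg a (by positivity)
  omega

theorem core (k : Nat) : ∀ (a b : Int),
    ((List.range k).map (fun m =>
      if PySem.Int.mod (fdivPow a m) 2 = 1 ∨ PySem.Int.mod (fdivPow b m) 2 = 1 then '#' else ' ')).reverse
    = (natBits k ((PySem.Int.mod a (2 ^ k)).toNat ||| (PySem.Int.mod b (2 ^ k)).toNat)).map trChar := by
  induction k with
  | zero => intro a b; simp [natBits]
  | succ k ih =>
    intro a b
    rw [List.range_succ_eq_map]
    simp only [List.map_cons, List.map_map, List.reverse_cons, natBits]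
    have hstep : ((List.range k).map ((fun m =>
        if PySem.Int.mod (fdivPow a m) 2 = 1 ∨ PySem.Int.mod (fdivPow b m) 2 = 1 then '#' else ' ')
          ∘ Nat.succ)).reverse
        = (natBits k ((PySem.Int.mod (PySem.Int.floordiv a 2) (2 ^ k)).toNat |||
            (PySem.Int.mod (PySem.Int.floordiv b 2) (2 ^ k)).toNat)).map trChar := by
      rw [← ih (PySem.Int.floordiv a 2) (PySem.Int.floordiv b 2)]
      congr 1
    have hdiv : ((PySem.Int.mod a (2 ^ (k+1))).toNat ||| (PySem.Int.mod b (2 ^ (k+1))).toNat) / 2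
        = (PySem.Int.mod (PySem.Int.floordiv a 2) (2 ^ k)).toNat |||
          (PySem.Int.mod (PySem.Int.floordiv b 2) (2 ^ k)).toNat := by
      rw [lor_div_two, half_mod, half_mod]
    have hbit : (((PySem.Int.mod a (2 ^ (k+1))).toNat ||| (PySem.Int.mod b (2 ^ (k+1))).toNat) % 2 = 1)
        ↔ (PySem.Int.mod a 2 = 1 ∨ PySem.Int.mod b 2 = 1) := by
      have hl : ∀ x y : Nat, (x ||| y) % 2 = 1 ↔ (x % 2 = 1 ∨ y % 2 = 1) := by
        intro x y
        have h1 : ∀ z : Nat, (z % 2 = 1) ↔ z.testBit 0 := by intro z; simp [Nat.testBit_zero]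
        rw [h1, h1, h1, Nat.testBit_lor, Bool.or_eq_true]
      rw [hl, low_bit, low_bit]
    rw [hstep, hdiv]
    simp only [List.map_append, List.map_cons, List.map_nil]
    congr 1
    simp only [fdivPow]
    by_cases h : PySem.Int.mod a 2 = 1 ∨ PySem.Int.mod b 2 = 1
    · rw [if_pos h, if_pos (hbit.mpr h)]; simp [trChar]
    · rw [if_neg h, if_neg (fun hc => h (hbit.mp hc))]; simp [trChar]

theorem if_push (c : Prop) [Decidable c] (ans : String) :
    (if c then ans ++ "#" else ans ++ " ") = ans ++ String.ofList [if c then '#' else ' '] := by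
  split_ifs <;> rfl

-- ===== VERDICT (by name: the statement is the Claim_ definition above) =====
theorem solution_spec : Claim_equal_solution := by
  intro n arr1 arr2 _ hpre
  show solution n arr1 arr2 = solution_alt n arr1 arr2
  unfold solution solution_alt
  rw [PySem.List.foldl_append_singleton_eq_map, PySem.List.foldl_append_singleton_eq_map]
  simp only [List.nil_append]
  apply List.map_congr_left
  intro i hi
  simp only [List.mem_range] at hi
  set N := n.toNat with hN
  set combined := arr1 ++ arr2 with hc
  have hNpos : 0 < n := by omega
  have hlen : 2 * N ≤ combined.length := by
    have := hpre hNpos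
    simp only [hc, List.length_append]
    omega
  have hi1 : i < combined.length := by omega
  have hi2 : i + N < combined.length := by omega
  have ha : combined.getD i 0 = combined[i] := List.getD_eq_getElem _ _ hi1
  have hb : combined.getD (i + N) 0 = combined[i + N] := List.getD_eq_getElem _ _ hi2
  have harr1 : (combined.map (solRow N)).getD i [] = solRow N combined[i] := by
    rw [List.getD_eq_getElem _ _ (by simpa using hi1)]; simp
  have harr2 : (combined.map (solRow N)).getD (i + N) [] = solRow N combined[i + N] := by
    rw [List.getD_eq_getElem _ _ (by simpa using hi2)]; simp
  unfold solInner
  rw [ha, hb, harr1, harr2]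
  have hbody : ∀ (ans : String) (j : Nat),
      (if (solRow N combined[i]).getD j 0 = 1 ∨ (solRow N combined[i+N]).getD j 0 = 1
       then ans ++ "#" else ans ++ " ")
      = ans ++ String.ofList [if (solRow N combined[i]).getD j 0 = 1 ∨ (solRow N combined[i+N]).getD j 0 = 1
          then '#' else ' '] := fun ans j => if_push _ ans
  calc (List.range N).foldl
        (fun ans j => if (solRow N combined[i]).getD j 0 = 1 ∨ (solRow N combined[i+N]).getD j 0 = 1
          then ans ++ "#" else ans ++ " ") ""
      = (List.range N).foldl
        (fun ans j => ans ++ String.ofList [if (solRow N combined[i]).getD j 0 = 1 ∨ (solRow N combined[i+N]).getD j 0 = 1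
          then '#' else ' ']) "" := by
        apply PySem.List.foldl_congr_mem
        intro ans j _
        exact hbody ans j
    _ = String.ofList ((List.range N).map (fun j =>
          if (solRow N combined[i]).getD j 0 = 1 ∨ (solRow N combined[i+N]).getD j 0 = 1
          then '#' else ' ')) := by
        rw [foldl_str]
        simp
    _ = String.ofList ((natBits N ((PySem.Int.mod combined[i] (2 ^ N)).toNat |||
          (PySem.Int.mod combined[i + N] (2 ^ N)).toNat)).map trChar) := by
        congr 1
        have hget : ∀ (c : Int) (j : Nat), j < N →
            (solRow N c).getD j 0 = PySem.Int.mod (fdivPow c (N - 1 - j)) 2 := by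
          intro c j hj
          rw [solRow_eq, List.getD_eq_getElem _ _ (by simpa using hj)]
          simp only [List.getElem_reverse, List.length_map, List.length_range, List.getElem_map,
            List.getElem_range]
        have h1 : (List.range N).map (fun j =>
            if (solRow N combined[i]).getD j 0 = 1 ∨ (solRow N combined[i+N]).getD j 0 = 1
            then '#' else ' ')
          = (List.range N).map (fun j =>
            if PySem.Int.mod (fdivPow combined[i] (N-1-j)) 2 = 1 ∨
               PySem.Int.mod (fdivPow combined[i+N] (N-1-j)) 2 = 1 then '#' else ' ') := by
          apply List.map_congr_left
          intro j hj
          simp only [List.mem_range] at hj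
          rw [hget _ _ hj, hget _ _ hj]
        rw [h1,
          map_range_rev (fun m => if PySem.Int.mod (fdivPow combined[i] m) 2 = 1 ∨
            PySem.Int.mod (fdivPow combined[i+N] m) 2 = 1 then '#' else ' ') N,
          core N combined[i] combined[i+N]]
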